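-- pv_equiv track=rewrite | github.com/Sideloading-Research/extremely_small_font | tools/build_font.py | get_char_width
-- ===== SOURCE A (Python) =====
-- def get_char_width(grid, max_cols, cell_size):
--     max_col = -1
--     for row in grid:
--         for col_idx, cell in enumerate(row):
--             if col_idx >= max_cols:
--                 break
--             if "#" in cell:
--                 if col_idx > max_col:
--                     max_col = col_idx
--
--     if max_col == -1:
--         return cell_size * 2
--
--     return (max_col + 1) * cell_size + cell_size
-- ===== SOURCE B (Python) =====
-- def get_char_width(grid, max_cols, cell_size):
--     width = 0
--     for row in grid:
--         if len(row) > width: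
--             width = len(row)
--     c = min(max_cols, width) - 1
--     while c >= 0:
--         if any(c < len(row) and "#" in row[c] for row in grid):
--             return (c + 1) * cell_size + cell_size
--         c -= 1
--     return cell_size * 2
-- ===== Notes on version B (the rewrite author's own statement) =====
-- stated objective: alternative
-- what changed: Replaces A's row-major accumulate-the-max double loop with a column-major scan: compute the column bound min(max_cols, widest row), then walk columns right-to-left and return at the first column where any row has a '#', eliminating the max accumulator entirely.
import Mathlib
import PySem

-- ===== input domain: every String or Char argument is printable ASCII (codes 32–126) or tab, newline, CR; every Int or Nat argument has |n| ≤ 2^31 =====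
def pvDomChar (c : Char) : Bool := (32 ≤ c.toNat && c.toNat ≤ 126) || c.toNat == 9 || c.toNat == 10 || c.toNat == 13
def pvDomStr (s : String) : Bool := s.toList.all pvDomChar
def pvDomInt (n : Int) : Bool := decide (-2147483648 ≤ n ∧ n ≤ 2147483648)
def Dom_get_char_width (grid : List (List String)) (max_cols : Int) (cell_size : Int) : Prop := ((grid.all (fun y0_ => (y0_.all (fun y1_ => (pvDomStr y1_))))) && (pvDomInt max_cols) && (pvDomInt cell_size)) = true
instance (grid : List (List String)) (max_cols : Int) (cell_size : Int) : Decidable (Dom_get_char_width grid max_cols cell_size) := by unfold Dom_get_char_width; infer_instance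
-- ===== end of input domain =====

-- B is an alternative, column-major implementation: it scans columns right-to-left and
-- returns at the first column containing '#'; A keeps a running row-major maximum.

-- ===== PORT A =====
-- inner 'for col_idx, cell in enumerate(row)' loop with its break and max-update
def rowLoopA (max_cols : Int) : List String → Int → Int → Int
  | [], _, mc => mc
  | cell :: rest, idx, mc =>
    if max_cols ≤ idx then mc
    else rowLoopA max_cols rest (idx + 1)
      (if PySem.Str.isIn "#" cell then (if mc < idx then idx else mc) else mc)

def get_char_width (grid : List (List String)) (max_cols : Int) (cell_size : Int) : Int :=
  let max_col := grid.foldl (fun mc row => rowLoopA max_cols row 0 mc) (-1)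
  if max_col = -1 then cell_size * 2
  else (max_col + 1) * cell_size + cell_size

-- ===== PORT B =====
-- width = widest row length (the 'for row in grid: if len(row) > width' loop)
def widthB (grid : List (List String)) : Int :=
  grid.foldl (fun w r => if w < (r.length : Int) then (r.length : Int) else w) 0

-- 'any(c < len(row) and "#" in row[c] for row in grid)'
def hitColB (grid : List (List String)) (c : Nat) : Bool :=
  grid.any (fun row => decide (c < row.length) && PySem.Str.isIn "#" (row.getD c ""))

-- the 'while c >= 0' countdown loop (k = c + 1)
def scanB (grid : List (List String)) (cell_size : Int) : Nat → Int
  | 0 => cell_size * 2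
  | k + 1 =>
    if hitColB grid k then ((k : Int) + 1) * cell_size + cell_size
    else scanB grid cell_size k

def get_char_width_alt (grid : List (List String)) (max_cols : Int) (cell_size : Int) : Int :=
  scanB grid cell_size (min max_cols (widthB grid)).toNat

-- ===== PRECONDITION & SPEC =====
def Spec_get_char_width (grid : List (List String)) (max_cols : Int) (cell_size : Int) (out : Int) : Prop := out = get_char_width_alt grid max_cols cell_size
instance (grid : List (List String)) (max_cols : Int) (cell_size : Int) (out : Int) : Decidable (Spec_get_char_width grid max_cols cell_size out) := by unfold Spec_get_char_width; infer_instance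

-- ===== CLAIM (what is proved, stated in full; the proofs are below) =====
def Claim_equal_get_char_width : Prop := ∀ (grid : List (List String)) (max_cols : Int) (cell_size : Int), Dom_get_char_width grid max_cols cell_size → Spec_get_char_width grid max_cols cell_size (get_char_width grid max_cols cell_size)

-- ===== LEMMAS AND PROOFS =====

-- Characterization of A's inner row loop.
lemma rowLoopA_spec (max_cols : Int) :
    ∀ (row : List String) (idx mc : Int),
      ((rowLoopA max_cols row idx mc = mc) ∨
        (∃ j : Nat, j < row.length ∧ rowLoopA max_cols row idx mc = idx + j ∧
          idx + j < max_cols ∧ PySem.Str.isIn "#" (row.getD j "") = true ∧ mc < idx + j)) ∧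
      mc ≤ rowLoopA max_cols row idx mc ∧
      (∀ j : Nat, j < row.length → idx + j < max_cols →
        PySem.Str.isIn "#" (row.getD j "") = true → idx + (j : Int) ≤ rowLoopA max_cols row idx mc) := by
  intro row
  induction row with
  | nil =>
    intro idx mc
    refine ⟨Or.inl rfl, le_refl _, ?_⟩
    intro j hj; simp at hj
  | cons cell rest ih =>
    intro idx mc
    by_cases hbrk : max_cols ≤ idx
    · have hr : rowLoopA max_cols (cell :: rest) idx mc = mc := by
        simp [rowLoopA, hbrk]
      refine ⟨Or.inl hr, le_of_eq hr.symm, ?_⟩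
      intro j _ hlt _
      have : (0 : Int) ≤ (j : Int) := Int.natCast_nonneg j
      omega
    · set mc' := (if PySem.Str.isIn "#" cell then (if mc < idx then idx else mc) else mc) with hmc'
      have hr : rowLoopA max_cols (cell :: rest) idx mc
          = rowLoopA max_cols rest (idx + 1) mc' := by
        simp [rowLoopA, hbrk, hmc']
      have hmcle : mc ≤ mc' := by
        rw [hmc']; split_ifs <;> omega
      obtain ⟨ih1, ih2, ih3⟩ := ih (idx + 1) mc'
      refine ⟨?_, ?_, ?_⟩
      · rcases ih1 with h | ⟨j, hjlen, hval, hjmax, hjhit, hjgt⟩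
        · -- recursive call returned mc'
          rw [hmc'] at h
          by_cases hin : PySem.Str.isIn "#" cell = true
          · by_cases hgt : mc < idx
            · refine Or.inr ⟨0, by simp, ?_, ?_, ?_, ?_⟩
              · rw [hr, h, if_pos hin, if_pos hgt]; simp
              · simpa using lt_of_not_ge hbrk
              · simpa using hin
              · simpa using hgt
            · refine Or.inl ?_
              rw [hr, h, if_pos hin, if_neg hgt]
          · refine Or.inl ?_
            rw [hr, h, if_neg hin]
        · refine Or.inr ⟨j + 1, by simpa using Nat.succ_lt_succ hjlen, ?_, ?_, ?_, ?_⟩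
          · rw [hr, hval]; push_cast; ring
          · push_cast; omega
          · simpa using hjhit
          · have : mc ≤ mc' := hmcle
            push_cast; omega
      · calc mc ≤ mc' := hmcle
          _ ≤ _ := by rw [hr]; exact ih2
      · intro j hjlen hjmax hjhit
        cases j with
        | zero =>
          have hin : PySem.Str.isIn "#" cell = true := by simpa using hjhit
          have hmc'ge : idx ≤ mc' := by
            rw [hmc', if_pos hin]; split_ifs <;> omega
          have : mc' ≤ rowLoopA max_cols rest (idx + 1) mc' := ih2
          rw [hr]; push_cast; omega
        | succ j' =>
          have h3 := ih3 j' (by simpa using Nat.lt_of_succ_lt_succ hjlen)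
            (by omega) (by simpa using hjhit)
          rw [hr]; push_cast; push_cast at h3; omega

-- Characterization of A's outer fold.
lemma foldA_spec (max_cols : Int) :
    ∀ (grid : List (List String)) (mc : Int),
      ((grid.foldl (fun mc row => rowLoopA max_cols row 0 mc) mc = mc) ∨
        (∃ c : Nat, grid.foldl (fun mc row => rowLoopA max_cols row 0 mc) mc = (c : Int) ∧
          (c : Int) < max_cols ∧
          ∃ row ∈ grid, c < row.length ∧ PySem.Str.isIn "#" (row.getD c "") = true)) ∧
      mc ≤ grid.foldl (fun mc row => rowLoopA max_cols row 0 mc) mc ∧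
      (∀ row ∈ grid, ∀ j : Nat, j < row.length → (j : Int) < max_cols →
        PySem.Str.isIn "#" (row.getD j "") = true →
        (j : Int) ≤ grid.foldl (fun mc row => rowLoopA max_cols row 0 mc) mc) := by
  intro grid
  induction grid with
  | nil =>
    intro mc
    exact ⟨Or.inl rfl, le_refl _, by simp⟩
  | cons row rest ih =>
    intro mc
    obtain ⟨r1, r2, r3⟩ := rowLoopA_spec max_cols row 0 mc
    obtain ⟨i1, i2, i3⟩ := ih (rowLoopA max_cols row 0 mc)
    have hfold : (row :: rest).foldl (fun mc row => rowLoopA max_cols row 0 mc) mc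
        = rest.foldl (fun mc row => rowLoopA max_cols row 0 mc) (rowLoopA max_cols row 0 mc) := by
      simp [List.foldl]
    refine ⟨?_, ?_, ?_⟩
    · rcases i1 with h | ⟨c, hval, hcm, r', hr'm, hr'l, hr'h⟩
      · rcases r1 with h0 | ⟨j, hjl, hjv, hjm, hjh, _⟩
        · exact Or.inl (by rw [hfold, h, h0])
        · refine Or.inr ⟨j, ?_, by omega, row, List.mem_cons_self, hjl, hjh⟩
          rw [hfold, h, hjv]; omega
      · exact Or.inr ⟨c, by rw [hfold, hval], hcm, r', List.mem_cons_of_mem _ hr'm, hr'l, hr'h⟩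
    · rw [hfold]; exact le_trans r2 i2
    · intro r' hr' j hjl hjm hjh
      rw [hfold]
      rcases List.mem_cons.mp hr' with rfl | hmem
      · have := r3 j hjl (by omega) hjh
        push_cast at this ⊢
        omega
      · exact i3 r' hmem j hjl hjm hjh

-- widthB bounds every row length.
lemma widthB_ge :
    ∀ (grid : List (List String)) (w : Int),
      w ≤ grid.foldl (fun w r => if w < (r.length : Int) then (r.length : Int) else w) w ∧
      (∀ row ∈ grid, (row.length : Int) ≤
        grid.foldl (fun w r => if w < (r.length : Int) then (r.length : Int) else w) w) := by
  intro grid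
  induction grid with
  | nil => intro w; exact ⟨le_refl _, by simp⟩
  | cons row rest ih =>
    intro w
    set w' := (if w < (row.length : Int) then (row.length : Int) else w) with hw'
    obtain ⟨ih1, ih2⟩ := ih w'
    have hfold : (row :: rest).foldl (fun w r => if w < (r.length : Int) then (r.length : Int) else w) w
        = rest.foldl (fun w r => if w < (r.length : Int) then (r.length : Int) else w) w' := by
      simp [List.foldl, hw']
    constructor
    · rw [hfold]
      have : w ≤ w' := by rw [hw']; split_ifs <;> omega
      omega
    · intro r hr
      rcases List.mem_cons.mp hr with rfl | hmem
      · rw [hfold]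
        have : (r.length : Int) ≤ w' := by rw [hw']; split_ifs <;> omega
        omega
      · rw [hfold]; exact ih2 r hmem

-- scanB when no column below k is hit.
lemma scanB_none (grid : List (List String)) (cs : Int) :
    ∀ k : Nat, (∀ c : Nat, c < k → hitColB grid c = false) → scanB grid cs k = cs * 2 := by
  intro k
  induction k with
  | zero => intro _; rfl
  | succ k ih =>
    intro h
    have hk : hitColB grid k = false := h k (Nat.lt_succ_self k)
    simp [scanB, hk]
    exact ih (fun c hc => h c (Nat.lt_succ_of_lt hc))

-- scanB when c is the greatest hit column below k.
lemma scanB_some (grid : List (List String)) (cs : Int) :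
    ∀ (k c : Nat), c < k → hitColB grid c = true →
      (∀ c' : Nat, c < c' → c' < k → hitColB grid c' = false) →
      scanB grid cs k = ((c : Int) + 1) * cs + cs := by
  intro k
  induction k with
  | zero => intro c hc; omega
  | succ k ih =>
    intro c hck hc hmax
    by_cases hek : c = k
    · subst hek; simp [scanB, hc]
    · have hkf : hitColB grid k = false := hmax k (by omega) (Nat.lt_succ_self k)
      simp [scanB, hkf]
      exact ih c (by omega) hc (fun c' h1 h2 => hmax c' h1 (Nat.lt_succ_of_lt h2))

-- hitColB c = true exactly when some row has '#' at column c.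
lemma hitColB_iff (grid : List (List String)) (c : Nat) :
    hitColB grid c = true ↔
      ∃ row ∈ grid, c < row.length ∧ PySem.Str.isIn "#" (row.getD c "") = true := by
  simp [hitColB]

-- ===== VERDICT (by name: the statement is the Claim_ definition above) =====
theorem get_char_width_spec : Claim_equal_get_char_width := by
  intro grid max_cols cell_size _
  unfold Spec_get_char_width get_char_width get_char_width_alt
  obtain ⟨f1, _, f3⟩ := foldA_spec max_cols grid (-1)
  set m := grid.foldl (fun mc row => rowLoopA max_cols row 0 mc) (-1) with hm
  obtain ⟨_, hwge⟩ := widthB_ge grid 0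
  have hwidth : ∀ row ∈ grid, (row.length : Int) ≤ widthB grid := by
    intro row hr; exact hwge row hr
  show (if m = -1 then cell_size * 2 else (m + 1) * cell_size + cell_size)
      = scanB grid cell_size (min max_cols (widthB grid)).toNat
  rcases f1 with hnone | ⟨c, hcv, hcm, row, hrow, hrl, hrh⟩
  · -- no hit column at all: A returns cell_size * 2
    rw [if_pos hnone]
    have hno : ∀ c : Nat, c < (min max_cols (widthB grid)).toNat → hitColB grid c = false := by
      intro c hc
      by_contra hne
      have ht : hitColB grid c = true := by
        cases h : hitColB grid c with
        | false => exact absurd h hne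
        | true => rfl
      obtain ⟨r, hr, hlen, hhit⟩ := (hitColB_iff grid c).mp ht
      have hcmx : (c : Int) < max_cols := by omega
      have := f3 r hr c hlen hcmx hhit
      rw [hnone] at this
      omega
    exact (scanB_none grid cell_size _ hno).symm
  · -- greatest hit column is c: both return (c+1)*cs+cs
    rw [if_neg (by rw [hcv]; omega), hcv]
    have hclt : c < (min max_cols (widthB grid)).toNat := by
      have h1 : (c : Int) < widthB grid := lt_of_lt_of_le (by exact_mod_cast hrl) (hwidth row hrow)
      omega
    have hhit : hitColB grid c = true := (hitColB_iff grid c).mpr ⟨row, hrow, hrl, hrh⟩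
    have hmax : ∀ c' : Nat, c < c' → c' < (min max_cols (widthB grid)).toNat →
        hitColB grid c' = false := by
      intro c' hgt hlt
      by_contra hne
      have ht : hitColB grid c' = true := by
        cases h : hitColB grid c' with
        | false => exact absurd h hne
        | true => rfl
      obtain ⟨r, hr, hlen, hh⟩ := (hitColB_iff grid c').mp ht
      have hcmx : (c' : Int) < max_cols := by omega
      have := f3 r hr c' hlen hcmx hh
      rw [hcv] at this
      have : c' ≤ c := by exact_mod_cast this
      omega
    exact (scanB_some grid cell_size _ c hclt hhit hmax).symm
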